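-- pv_equiv track=rewrite | github.com/binchen15/leet-python | interview/prob1647.py | helper
-- ===== SOURCE A (Python) =====
-- def helper(d):
--     """assume d is not empty, and handles the most frequent chars in d"""
--
--     m = max(d.values())
--     flag = True # for the first one with highest count, delete the key, others reduce the count by 1
--     ans = 0
--
--     items = list(d.items())
--     for key, val in items:
--         if val == m:
--             if flag:
--                 del d[key]
--                 flag = False
--             else:
--                 if m == 1:
--                     del d[key]
--                 else:
--                     d[key] = m-1
--                 ans += 1
--
--     return ans
-- ===== SOURCE B (Python) =====
-- def helper(d):
--     """assume d is not empty, and handles the most frequent chars in d"""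
--     items = sorted(d.items(), key=lambda kv: kv[1], reverse=True)
--     m = items[0][1]
--     run = 0
--     while run < len(items) and items[run][1] == m:
--         run += 1
--     for idx in range(run):
--         k = items[idx][0]
--         if idx == 0 or m == 1:
--             del d[k]
--         else:
--             d[k] = m - 1
--     return run - 1
-- ===== Notes on version B (the rewrite author's own statement) =====
-- stated objective: alternative
-- what changed: B sorts the items by value descending (stable sort keeps insertion order among ties), measures the length of the leading run of max-valued items with a while loop and returns run-1, mutating exactly that prefix; A instead takes max() first and walks the dict once with a first-seen flag and an incremented counter.
-- outside the precondition, e.g. on helper({}): A raises ValueError, B raises IndexError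
import Mathlib
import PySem

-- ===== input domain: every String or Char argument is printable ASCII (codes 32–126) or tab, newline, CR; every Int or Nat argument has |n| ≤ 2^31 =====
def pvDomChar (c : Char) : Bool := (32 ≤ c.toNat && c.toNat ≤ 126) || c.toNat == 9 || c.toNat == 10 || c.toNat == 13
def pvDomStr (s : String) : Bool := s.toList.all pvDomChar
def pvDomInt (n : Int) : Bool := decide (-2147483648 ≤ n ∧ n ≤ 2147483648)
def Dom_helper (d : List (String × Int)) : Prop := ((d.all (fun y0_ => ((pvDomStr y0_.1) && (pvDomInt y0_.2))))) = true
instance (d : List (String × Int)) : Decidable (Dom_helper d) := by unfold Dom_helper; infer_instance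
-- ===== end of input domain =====

-- B sorts the items by value descending (stable) and returns the length of the leading
-- run of max-valued items minus 1; objective: alternative (sort-then-scan vs flagged loop).
-- Both A and B mutate the dict argument identically (B reproduces the mutation in Python);
-- the equivalence proved here is about the RETURN value.

-- ===== PORT A =====
-- one loop step of A's for-loop: state = (the dict being mutated, flag, ans)
def helperStep (m : Int) (st : PySem.Dict String Int × Bool × Int) (kv : String × Int) :
    PySem.Dict String Int × Bool × Int :=
  if kv.2 = m then
    (if st.2.1 then (PySem.Dict.erase st.1 kv.1, false, st.2.2)
     else (if m = 1 then (PySem.Dict.erase st.1 kv.1, st.2.1, st.2.2 + 1)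
           else (PySem.Dict.insert st.1 kv.1 (m - 1), st.2.1, st.2.2 + 1)))
  else st

def helper (d : List (String × Int)) : Int :=
  match PySem.List.max? (d.map Prod.snd) (fun v => v) with
  | none => 0   -- unreachable under Pre_helper (Python's max raises on an empty dict)
  | some m => (d.foldl (helperStep m) (PySem.Dict.ofList d, true, 0)).2.2

-- ===== PORT B =====
-- Source B's while loop: length of the leading run of items whose value equals m
def runLen (m : Int) : List (String × Int) → Nat
  | [] => 0
  | kv :: t => if kv.2 = m then runLen m t + 1 else 0

def helper_alt (d : List (String × Int)) : Int :=
  match PySem.List.sorted d (fun kv => kv.2) true with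
  | [] => 0   -- unreachable under Pre_helper (items[0] raises IndexError)
  | kv :: t =>
    -- m = items[0][1]; run = while-loop count; the for-loop over items[:run] only
    -- mutates the dict and does not affect the return; return run - 1
    ((runLen kv.2 (kv :: t) : Int)) - 1

-- ===== PRECONDITION & SPEC =====
-- Pre_ excludes the empty dict, on which A's `max` raises ValueError, and association
-- lists with duplicate keys, which do not represent any Python dict (dict construction
-- collapses them, so they correspond to no input A is ever run on).
def Pre_helper (d : List (String × Int)) : Prop := d ≠ [] ∧ (d.map Prod.fst).Nodup
instance (d : List (String × Int)) : Decidable (Pre_helper d) := by unfold Pre_helper; infer_instance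
def pvWitness_helper : (List (String × Int)) := [("a", 2), ("b", 2), ("c", 1)]
def Spec_helper (d : List (String × Int)) (out : Int) : Prop := out = helper_alt d
instance (d : List (String × Int)) (out : Int) : Decidable (Spec_helper d out) := by unfold Spec_helper; infer_instance

-- ===== CLAIM (what is proved, stated in full; the proofs are below) =====
def Claim_equal_helper : Prop := ∀ (d : List (String × Int)), Dom_helper d → Pre_helper d → Spec_helper d (helper d)

-- ===== LEMMAS AND PROOFS =====

-- A's loop, flag already cleared: each further max-entry adds exactly 1 to ans
theorem helperStep_false (m : Int) (l : List (String × Int)) :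
    ∀ (dd : PySem.Dict String Int) (a : Int),
    (l.foldl (helperStep m) (dd, false, a)).2.2 = a + l.countP (fun kv => kv.2 = m) := by
  induction l with
  | nil => intro dd a; simp
  | cons x t ih =>
    intro dd a
    by_cases hx : x.2 = m
    · simp [helperStep, hx]
      split_ifs <;> simp [ih] <;> ring
    · simp [helperStep, hx, ih]

-- A's loop, flag still set: the first max-entry is free and each later one adds 1
theorem helperStep_true (m : Int) (l : List (String × Int)) :
    ∀ (dd : PySem.Dict String Int) (a : Int),
    (l.foldl (helperStep m) (dd, true, a)).2.2 =
      if l.countP (fun kv => kv.2 = m) = 0 then a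
      else a + l.countP (fun kv => kv.2 = m) - 1 := by
  induction l with
  | nil => intro dd a; simp
  | cons x t ih =>
    intro dd a
    by_cases hx : x.2 = m
    · simp only [List.foldl_cons, helperStep, hx, if_pos]
      rw [helperStep_false m t]
      simp [hx]
      ring
    · simp only [List.foldl_cons, helperStep]
      rw [if_neg (by simp [hx]), ih, List.countP_cons_of_neg (pa := by simp [hx])]

-- in a value-descending list all of whose values are ≤ m, the leading run of
-- value-m items contains every value-m item
theorem runLen_eq_countP (m : Int) (l : List (String × Int))
    (hp : l.Pairwise (fun a b => b.2 ≤ a.2)) (hle : ∀ x ∈ l, x.2 ≤ m) :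
    runLen m l = l.countP (fun kv => kv.2 = m) := by
  induction l with
  | nil => simp [runLen]
  | cons x t ih =>
    by_cases hx : x.2 = m
    · rw [runLen, if_pos hx, List.countP_cons_of_pos (pa := by simp [hx]),
        ih hp.of_cons (fun y hy => hle y (List.mem_cons_of_mem _ hy))]
    · have hxlt : x.2 < m := lt_of_le_of_ne (hle x (List.mem_cons_self)) hx
      rw [runLen, if_neg hx, List.countP_cons_of_neg (pa := by simp [hx])]
      symm
      rw [List.countP_eq_zero]
      intro y hy
      have : y.2 ≤ x.2 := (List.pairwise_cons.mp hp).1 y hy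
      simp; omega

theorem helper_spec : Claim_equal_helper := by
  intro d _ hpre
  unfold Spec_helper helper helper_alt
  cases hsort : PySem.List.sorted d (fun kv => kv.2) true with
  | nil => exact absurd ((PySem.List.sorted_eq_nil_iff _ _ _).mp hsort) hpre.1
  | cons kv t =>
    -- kv.2 is the maximum value
    have hperm : (kv :: t).Perm d := hsort ▸ PySem.List.sorted_perm d _ true
    have hmax_all : ∀ y ∈ d, y.2 ≤ kv.2 := PySem.List.key_head_sorted_rev_ge d (fun x => x.2) hsort
    have hkv_mem : kv ∈ d := hperm.mem_iff.mp List.mem_cons_self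
    cases hA : PySem.List.max? (d.map Prod.snd) (fun v => v) with
    | none =>
      exact absurd (List.map_eq_nil_iff.mp ((PySem.List.max?_eq_none_iff _ _).mp hA)) hpre.1
    | some m' =>
      have hm'mem : m' ∈ d.map Prod.snd := PySem.List.max?_mem hA
      obtain ⟨y, hy, hy2⟩ := List.mem_map.mp hm'mem
      have h1 : m' ≤ kv.2 := hy2 ▸ hmax_all y hy
      have h2 : kv.2 ≤ m' :=
        PySem.List.max?_isMax hA kv.2 (List.mem_map.mpr ⟨kv, hkv_mem, rfl⟩)
      have hm' : m' = kv.2 := le_antisymm h1 h2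
      subst hm'
      -- both sides are (count of max-valued items) - 1
      have hcount : (kv :: t).countP (fun x => x.2 = kv.2) = d.countP (fun x => x.2 = kv.2) :=
        hperm.countP_eq _
      have hpw : (kv :: t).Pairwise (fun a b => b.2 ≤ a.2) :=
        hsort ▸ PySem.List.sorted_pairwise_rev d (fun x => x.2) (κ := Int)
      have hrun := runLen_eq_countP kv.2 (kv :: t) hpw
        (fun x hx => hmax_all x (hperm.mem_iff.mp hx))
      have hpos : 0 < d.countP (fun x => x.2 = kv.2) :=
        List.countP_pos_iff.mpr ⟨kv, hkv_mem, by simp⟩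
      dsimp only
      rw [helperStep_true, if_neg (by omega), hrun, hcount]
      omega

-- ===== VERDICT (by name: the statement is the Claim_ definition above) =====
-- (helper_spec above is the verdict theorem)
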